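-- pv_equiv track=rewrite | github.com/fcai5648-png/cls-pipeline | src/enrich.py | _match_flat
-- ===== SOURCE A (Python) =====
-- from typing import Iterable
--
-- def _match_flat(text: str, names: Iterable[str]) -> list[str]:
--     """精确名称命中(列表已按长度倒序,先长后短,本质上 substring)。"""
--     out: list[str] = []
--     seen: set[str] = set()
--     for name in names:
--         if name in text and name not in seen:
--             out.append(name)
--             seen.add(name)
--     return out
-- ===== SOURCE B (Python) =====
-- def _match_flat(text: str, names) -> list[str]:
--     """For each distinct name length, slide a window of that length over text and
--     collect windows that are names (hash-set lookup) into a 'present' set; then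
--     emit names in input order, removing each emitted name from that set (dedupes)."""
--     names = list(names)
--     name_set = set(names)
--     present = set()
--     for length in {len(name) for name in names}:
--         for i in range(len(text) - length + 1):
--             window = text[i:i + length]
--             if window in name_set:
--                 present.add(window)
--     out = []
--     for name in names:
--         if name in present:
--             out.append(name)
--             present.discard(name)
--     return out
-- ===== Notes on version B (the rewrite author's own statement) =====
-- stated objective: faster
-- what changed: Instead of running a substring search per name, B slides a window of each distinct name length over the text once, collecting windows that are names via a hash-set lookup into a 'present' set, then emits names in input order while discarding emitted ones from the set.
import Mathlib
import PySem

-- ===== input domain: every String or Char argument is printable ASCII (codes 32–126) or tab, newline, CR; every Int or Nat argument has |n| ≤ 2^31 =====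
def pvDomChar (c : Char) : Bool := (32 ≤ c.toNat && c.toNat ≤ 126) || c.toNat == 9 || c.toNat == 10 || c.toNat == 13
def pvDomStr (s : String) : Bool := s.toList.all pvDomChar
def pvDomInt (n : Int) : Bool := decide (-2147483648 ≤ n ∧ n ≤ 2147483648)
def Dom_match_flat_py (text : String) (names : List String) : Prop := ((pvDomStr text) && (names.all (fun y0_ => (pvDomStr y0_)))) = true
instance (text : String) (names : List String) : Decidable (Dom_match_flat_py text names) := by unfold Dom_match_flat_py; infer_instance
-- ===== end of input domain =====

-- B replaces A's per-name substring scan by sliding a window of each distinct name length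
-- over the text once, collecting windows that are names (set lookup) into a 'present' set,
-- then emitting names in input order while discarding emitted ones from that set.
-- ===== PORT A =====
def match_flat_py (text : String) (names : List String) : List String :=
  (names.foldl
    (fun (st : List String × PySem.Set String) name =>
      if PySem.Str.isIn name text && !(PySem.Set.contains st.2 name) then
        (st.1 ++ [name], PySem.Set.add st.2 name)
      else st)
    ([], PySem.Set.empty)).1

-- ===== PORT B =====
def match_flat_py_alt (text : String) (names : List String) : List String :=
  let nameSet : PySem.Set String := PySem.Set.ofList names
  let lengths : PySem.Set Int := PySem.Set.ofList (names.map PySem.Str.len)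
  let present : PySem.Set String :=
    lengths.foldl
      (fun pres length =>
        (PySem.List.pyRange 0 (PySem.Str.len text - length + 1) 1).foldl
          (fun pres i =>
            let window := PySem.Str.slice text (some i) (some (i + length))
            if PySem.Set.contains nameSet window then PySem.Set.add pres window else pres)
          pres)
      PySem.Set.empty
  (names.foldl
    (fun (st : List String × PySem.Set String) name =>
      if PySem.Set.contains st.2 name then
        (st.1 ++ [name], PySem.Set.discard st.2 name)
      else st)
    ([], present)).1

-- ===== PRECONDITION & SPEC =====
def Spec_match_flat_py (text : String) (names : List String) (out : List String) : Prop := out = match_flat_py_alt text names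
instance (text : String) (names : List String) (out : List String) : Decidable (Spec_match_flat_py text names out) := by unfold Spec_match_flat_py; infer_instance

-- ===== CLAIM (what is proved, stated in full; the proofs are below) =====
def Claim_equal_match_flat_py : Prop := ∀ (text : String) (names : List String), Dom_match_flat_py text names → Spec_match_flat_py text names (match_flat_py text names)

-- ===== LEMMAS AND PROOFS =====

-- A take of a drop is a contiguous piece, hence an infix.
lemma take_drop_infix {α : Type} (l : List α) (a k : Nat) : (l.drop a).take k <:+: l :=
  ⟨l.take a, (l.drop a).drop k, by simp⟩

-- Membership in B's window scan for one length: the fold adds exactly the windows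
-- that pass the test.
lemma mem_window_fold (w : Int → String) (cond : String → Bool) (x : String) :
    ∀ (is : List Int) (p : PySem.Set String),
      x ∈ is.foldl (fun p i => if cond (w i) then PySem.Set.add p (w i) else p) p ↔
        x ∈ p ∨ ((∃ i ∈ is, w i = x) ∧ cond x = true) := by
  intro is
  induction is with
  | nil => intro p; simp
  | cons i rest ih =>
    intro p
    by_cases hc : cond (w i) = true
    · simp only [List.foldl_cons, hc, if_true, ih, PySem.Set.mem_add]
      constructor
      · rintro ((hp | he) | ⟨⟨j, hj, hw⟩, hcx⟩)
        · exact Or.inl hp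
        · exact Or.inr ⟨⟨i, List.mem_cons_self, he.symm⟩, by rw [he]; exact hc⟩
        · exact Or.inr ⟨⟨j, List.mem_cons_of_mem _ hj, hw⟩, hcx⟩
      · rintro (hp | ⟨⟨j, hj, hw⟩, hcx⟩)
        · exact Or.inl (Or.inl hp)
        · rcases List.mem_cons.mp hj with rfl | hj
          · exact Or.inl (Or.inr hw.symm)
          · exact Or.inr ⟨⟨j, hj, hw⟩, hcx⟩
    · have hc' : cond (w i) = false := by simpa using hc
      simp only [List.foldl_cons, hc', Bool.false_eq_true, if_false, ih]
      constructor
      · rintro (hp | ⟨⟨j, hj, hw⟩, hcx⟩)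
        · exact Or.inl hp
        · exact Or.inr ⟨⟨j, List.mem_cons_of_mem _ hj, hw⟩, hcx⟩
      · rintro (hp | ⟨⟨j, hj, hw⟩, hcx⟩)
        · exact Or.inl hp
        · rcases List.mem_cons.mp hj with rfl | hj
          · exact absurd (hw ▸ hcx) hc
          · exact Or.inr ⟨⟨j, hj, hw⟩, hcx⟩

-- Membership in B's full scan over the distinct lengths.
lemma mem_length_fold (w : Int → Int → String) (rng : Int → List Int) (cond : String → Bool)
    (x : String) :
    ∀ (Ls : List Int) (p : PySem.Set String),
      x ∈ Ls.foldl
            (fun p L =>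
              (rng L).foldl (fun p i => if cond (w L i) then PySem.Set.add p (w L i) else p) p)
            p ↔
        x ∈ p ∨ ((∃ L ∈ Ls, ∃ i ∈ rng L, w L i = x) ∧ cond x = true) := by
  intro Ls
  induction Ls with
  | nil => intro p; simp
  | cons L rest ih =>
    intro p
    simp only [List.foldl_cons, ih, mem_window_fold]
    constructor
    · rintro ((hp | ⟨⟨j, hj, hw⟩, hcx⟩) | ⟨⟨M, hM, j, hj, hw⟩, hcx⟩)
      · exact Or.inl hp
      · exact Or.inr ⟨⟨L, List.mem_cons_self, j, hj, hw⟩, hcx⟩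
      · exact Or.inr ⟨⟨M, List.mem_cons_of_mem _ hM, j, hj, hw⟩, hcx⟩
    · rintro (hp | ⟨⟨M, hM, j, hj, hw⟩, hcx⟩)
      · exact Or.inl (Or.inl hp)
      · rcases List.mem_cons.mp hM with rfl | hM
        · exact Or.inl (Or.inr ⟨⟨j, hj, hw⟩, hcx⟩)
        · exact Or.inr ⟨⟨M, hM, j, hj, hw⟩, hcx⟩

-- A window of some name's length equals `x` at some position iff `x` is a substring
-- of the text (for x one of the names).
lemma window_iff (text x : String) (names : List String) (hx : x ∈ names) :
    (∃ L ∈ names.map PySem.Str.len, ∃ i ∈ PySem.List.pyRange 0 (PySem.Str.len text - L + 1) 1,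
        PySem.Str.slice text (some i) (some (i + L)) = x) ↔
      PySem.Str.isIn x text = true := by
  constructor
  · rintro ⟨L, hL, i, hi, hslice⟩
    rcases List.mem_map.mp hL with ⟨n, _, rfl⟩
    have hL0 : 0 ≤ PySem.Str.len n := by rw [PySem.Str.len_eq]; positivity
    rcases PySem.List.mem_pyRange_one.mp hi with ⟨hi0, _⟩
    have hx' : x.toList =
        List.take ((i + PySem.Str.len n).toNat - i.toNat) (List.drop i.toNat text.toList) := by
      rw [← hslice]
      unfold PySem.Str.slice
      rw [String.toList_ofList, PySem.Chars.slice_eq_listSlice,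
        PySem.List.slice_toNat _ hi0 (by omega)]
    rw [PySem.Str.isIn_eq, PySem.Chars.isIn_iff_infix, hx']
    exact take_drop_infix text.toList i.toNat ((i + PySem.Str.len n).toNat - i.toNat)
  · intro hin
    rw [PySem.Str.isIn_eq, ← PySem.Chars.exists_prefix_drop_iff_isIn] at hin
    rcases hin with ⟨j, hj⟩
    -- normalise the witness so that j + |x| ≤ |text|
    have hbound : ∃ j, x.toList <+: text.toList.drop j ∧ j + x.toList.length ≤ text.toList.length := by
      by_cases hle : j + x.toList.length ≤ text.toList.length
      · exact ⟨j, hj, hle⟩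
      · have hlen := hj.length_le
        rw [List.length_drop] at hlen
        have hxnil : x.toList = [] := List.eq_nil_of_length_eq_zero (by omega)
        exact ⟨0, by simp [hxnil], by simp [hxnil]⟩
    rcases hbound with ⟨j, hj, hle⟩
    refine ⟨PySem.Str.len x, List.mem_map.mpr ⟨x, hx, rfl⟩, (j : Int),
      PySem.List.mem_pyRange_one.mpr ⟨Int.natCast_nonneg _, ?_⟩, ?_⟩
    · rw [PySem.Str.len_eq, PySem.Str.len_eq]; omega
    · have htake : List.take x.toList.length (List.drop j text.toList) = x.toList :=
        (List.prefix_iff_eq_take.mp hj).symm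
      have : (PySem.Str.slice text (some (j : Int)) (some ((j : Int) + PySem.Str.len x))).toList
          = x.toList := by
        unfold PySem.Str.slice
        rw [String.toList_ofList, PySem.Chars.slice_eq_listSlice,
          PySem.List.slice_toNat _ (Int.natCast_nonneg _)
            (by rw [PySem.Str.len_eq]; positivity)]
        rw [PySem.Str.len_eq]
        have harith : ((j : Int) + (x.toList.length : Int)).toNat - (j : Int).toNat
            = x.toList.length := by omega
        rw [harith, Int.toNat_natCast, htake]
      have := congrArg String.ofList this
      simpa using this

-- Characterisation of B's `present` set.
lemma mem_present (text : String) (names : List String) (x : String) :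
    x ∈ (PySem.Set.ofList (names.map PySem.Str.len)).foldl
          (fun pres length =>
            (PySem.List.pyRange 0 (PySem.Str.len text - length + 1) 1).foldl
              (fun pres i =>
                let window := PySem.Str.slice text (some i) (some (i + length))
                if PySem.Set.contains (PySem.Set.ofList names) window then
                  PySem.Set.add pres window
                else pres)
              pres)
          PySem.Set.empty ↔
      x ∈ names ∧ PySem.Str.isIn x text = true := by
  rw [show ((PySem.Set.ofList (names.map PySem.Str.len)).foldl
          (fun pres length =>
            (PySem.List.pyRange 0 (PySem.Str.len text - length + 1) 1).foldl
              (fun pres i =>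
                let window := PySem.Str.slice text (some i) (some (i + length))
                if PySem.Set.contains (PySem.Set.ofList names) window then
                  PySem.Set.add pres window
                else pres)
              pres)
          PySem.Set.empty)
      = ((PySem.Set.ofList (names.map PySem.Str.len)).foldl
          (fun pres length =>
            (PySem.List.pyRange 0 (PySem.Str.len text - length + 1) 1).foldl
              (fun pres i =>
                if PySem.Set.contains (PySem.Set.ofList names)
                    (PySem.Str.slice text (some i) (some (i + length))) then
                  PySem.Set.add pres (PySem.Str.slice text (some i) (some (i + length)))
                else pres)
              pres)
          PySem.Set.empty) from rfl]
  rw [mem_length_fold (fun L i => PySem.Str.slice text (some i) (some (i + L)))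
    (fun L => PySem.List.pyRange 0 (PySem.Str.len text - L + 1) 1)
    (fun wnd => PySem.Set.contains (PySem.Set.ofList names) wnd) x]
  have hcont : (PySem.Set.contains (PySem.Set.ofList names) x = true) ↔ x ∈ names := by
    simp [PySem.Set.contains, PySem.Set.mem_ofList]
  constructor
  · rintro (hp | ⟨⟨L, hL, hwin⟩, hcx⟩)
    · simp [PySem.Set.empty] at hp
    · have hx : x ∈ names := hcont.mp hcx
      refine ⟨hx, (window_iff text x names hx).mp ⟨L, ?_, hwin⟩⟩
      exact (PySem.Set.mem_ofList _ _).mp hL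
  · rintro ⟨hx, hin⟩
    rcases (window_iff text x names hx).mpr hin with ⟨L, hL, hwin⟩
    exact Or.inr ⟨⟨L, (PySem.Set.mem_ofList _ _).mpr hL, hwin⟩, hcont.mpr hx⟩

-- A's dedup-by-seen loop and B's emit-and-discard loop produce the same list whenever
-- the two sets they carry are related by: n is still in `pres` iff it is a substring
-- of the text and not yet in `seen`.
lemma final_loops (text : String) :
    ∀ (rest out : List String) (seen pres : PySem.Set String),
      (∀ n ∈ rest,
        (n ∈ pres ↔ (PySem.Str.isIn n text = true ∧ n ∉ seen))) →
      (rest.foldl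
        (fun (st : List String × PySem.Set String) name =>
          if PySem.Str.isIn name text && !(PySem.Set.contains st.2 name) then
            (st.1 ++ [name], PySem.Set.add st.2 name)
          else st)
        (out, seen)).1
      = (rest.foldl
        (fun (st : List String × PySem.Set String) name =>
          if PySem.Set.contains st.2 name then
            (st.1 ++ [name], PySem.Set.discard st.2 name)
          else st)
        (out, pres)).1 := by
  intro rest
  induction rest with
  | nil => intro out seen pres _; rfl
  | cons n rest ih =>
    intro out seen pres hinv
    have hn := hinv n List.mem_cons_self
    by_cases hmem : n ∈ pres
    · have h1 : PySem.Str.isIn n text = true := (hn.mp hmem).1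
      have h2 : n ∉ seen := (hn.mp hmem).2
      have hbB : PySem.Set.contains pres n = true := by
        simp [PySem.Set.contains, hmem]
      have hbA : (PySem.Str.isIn n text && !(PySem.Set.contains seen n)) = true := by
        rw [h1]
        simp [PySem.Set.contains, h2]
      simp only [List.foldl_cons, hbA, hbB, if_true]
      apply ih
      intro m hm
      have hmi := hinv m (List.mem_cons_of_mem _ hm)
      have hd : m ∈ PySem.Set.discard pres n ↔ (m ∈ pres ∧ m ≠ n) := by
        simp [PySem.Set.discard]
      have hadd : m ∈ PySem.Set.add seen n ↔ (m ∈ seen ∨ m = n) :=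
        PySem.Set.mem_add seen n m
      rw [hd, hadd, hmi]
      tauto
    · have hbB : PySem.Set.contains pres n = false := by
        simp [PySem.Set.contains, hmem]
      have hbA : (PySem.Str.isIn n text && !(PySem.Set.contains seen n)) = false := by
        by_cases hs : n ∈ seen
        · simp [PySem.Set.contains, hs]
        · have hIsF : PySem.Str.isIn n text = false := by
            cases hIs : PySem.Str.isIn n text with
            | false => rfl
            | true => exact absurd (hn.mpr ⟨hIs, hs⟩) hmem
          rw [hIsF]
          simp
      simp only [List.foldl_cons, hbA, hbB, Bool.false_eq_true, if_false]
      exact ih out seen pres (fun m hm => hinv m (List.mem_cons_of_mem _ hm))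

-- ===== VERDICT (by name: the statement is the Claim_ definition above) =====
theorem match_flat_py_spec : Claim_equal_match_flat_py := by
  intro text names _
  unfold Spec_match_flat_py match_flat_py match_flat_py_alt
  apply final_loops
  intro n hn
  rw [mem_present]
  simp [PySem.Set.empty, hn]
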